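-- pv_equiv track=rewrite | github.com/shahbajsingh/leetcode | similar_text_substr_count.py | similar_text_substr_count
-- ===== SOURCE A (Python) =====
-- def similar_text_substr_count(key: str, text: str) -> int:
--     k = len(key) # |key|
--     t = len(text) # |text|
--
--     if k == 0 or k > t:
--         return 0
--
--     match_ct = 0
--
--     # iterate thru substrs of len k
--     for i in range(t - k + 1):
--         substr = text[i:i+k] # substr of len k
--
--         if substr == key:
--             match_ct += 1
--             continue
--
--         # check if swapping two adjacent chars in s can make it equal to key
--         for j in range(k - 1):
--             swap_list = list(substr)
--             # swap chars at j and j+1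
--             swap_list[j], swap_list[j+1] = swap_list[j+1], swap_list[j]
--             swap_str = ''.join(swap_list)
--
--             if swap_str == key:
--                 match_ct += 1
--                 break
--
--     return match_ct
-- ===== SOURCE B (Python) =====
-- def similar_text_substr_count(key: str, text: str) -> int:
--     k = len(key)
--     t = len(text)
--
--     if k == 0 or k > t:
--         return 0
--
--     count = 0
--     # single mismatch scan per window: no swap strings are ever built
--     for i in range(t - k + 1):
--         mm = [j for j in range(k) if text[i + j] != key[j]]
--         if not mm:
--             count += 1
--         elif (len(mm) == 2 and mm[1] == mm[0] + 1
--               and text[i + mm[0]] == key[mm[1]]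
--               and text[i + mm[1]] == key[mm[0]]):
--             count += 1
--     return count
-- ===== Notes on version B (the rewrite author's own statement) =====
-- stated objective: faster
-- what changed: Per window, instead of materialising every adjacent-swap candidate string and comparing each against the key (an O(k^2) inner double pass), B does one mismatch scan of the window and counts it if there are 0 mismatches or exactly 2 adjacent cross-matching mismatches.
import Mathlib
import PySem

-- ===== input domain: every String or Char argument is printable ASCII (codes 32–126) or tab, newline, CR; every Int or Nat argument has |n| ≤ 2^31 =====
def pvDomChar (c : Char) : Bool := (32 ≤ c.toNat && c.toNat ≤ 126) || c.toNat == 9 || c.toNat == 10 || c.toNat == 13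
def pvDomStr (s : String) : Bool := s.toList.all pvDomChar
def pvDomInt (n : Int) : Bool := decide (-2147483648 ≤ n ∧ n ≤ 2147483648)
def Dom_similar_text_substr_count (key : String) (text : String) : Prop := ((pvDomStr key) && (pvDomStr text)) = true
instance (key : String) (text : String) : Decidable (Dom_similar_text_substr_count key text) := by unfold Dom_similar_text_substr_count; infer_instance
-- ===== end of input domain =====

-- B replaces A's per-window construction of every adjacent-swap candidate string
-- by a single mismatch scan of the window (objective: faster).

-- ===== PORT A =====
-- A's inner `for j in range(k-1)` loop with its break: does some adjacent swap of substr equal key?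
-- (indices j, j+1 are always in range here, so `getD _ ' '` is exactly Python's indexing)
def pvASwapLoop (substr keyL : List Char) : List Nat → Bool
  | [] => false
  | j :: rest =>
    -- swap chars at j and j+1
    let a := substr.getD j ' '
    let b := substr.getD (j + 1) ' '
    let swapStr := (substr.set j b).set (j + 1) a
    if swapStr = keyL then true else pvASwapLoop substr keyL rest

def similar_text_substr_count (key : String) (text : String) : Int :=
  let keyL := key.toList
  let textL := text.toList
  let k := keyL.length
  let t := textL.length
  if k = 0 ∨ t < k then 0
  else
    (List.range (t - k + 1)).foldl
      (fun (match_ct : Int) (i : Nat) =>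
        let substr := PySem.List.slice textL (some (i : Int)) (some ((i : Int) + (k : Int)))
        if substr = keyL then match_ct + 1
        else if pvASwapLoop substr keyL (List.range (k - 1)) then match_ct + 1
        else match_ct) 0

-- ===== PORT B =====
-- one window of B: mismatch positions; count if none, or exactly two adjacent cross-matching ones
-- (text[i+j] and key[j] are always in range here, so `getD _ ' '` is exactly Python's indexing)
def pvBWindow (keyL textL : List Char) (i : Nat) (count : Int) : Int :=
  let mm := (List.range keyL.length).filter (fun j => textL.getD (i + j) ' ' != keyL.getD j ' ')
  if mm = [] then count + 1
  else if mm.length = 2 ∧ mm.getD 1 0 = mm.getD 0 0 + 1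
        ∧ textL.getD (i + mm.getD 0 0) ' ' = keyL.getD (mm.getD 1 0) ' '
        ∧ textL.getD (i + mm.getD 1 0) ' ' = keyL.getD (mm.getD 0 0) ' '
  then count + 1 else count

def similar_text_substr_count_alt (key : String) (text : String) : Int :=
  let keyL := key.toList
  let textL := text.toList
  let k := keyL.length
  let t := textL.length
  if k = 0 ∨ t < k then 0
  else (List.range (t - k + 1)).foldl (fun count i => pvBWindow keyL textL i count) 0

-- ===== PRECONDITION & SPEC =====
def Spec_similar_text_substr_count (key : String) (text : String) (out : Int) : Prop := out = similar_text_substr_count_alt key text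
instance (key : String) (text : String) (out : Int) : Decidable (Spec_similar_text_substr_count key text out) := by unfold Spec_similar_text_substr_count; infer_instance

-- ===== CLAIM (what is proved, stated in full; the proofs are below) =====
def Claim_equal_similar_text_substr_count : Prop := ∀ (key : String) (text : String), Dom_similar_text_substr_count key text → Spec_similar_text_substr_count key text (similar_text_substr_count key text)

-- ===== LEMMAS AND PROOFS =====

-- lists of equal length agreeing at every position (read through getD) are equal
lemma pv_ext_getD {xs ys : List Char} (hlen : xs.length = ys.length)
    (h : ∀ m, m < ys.length → xs.getD m ' ' = ys.getD m ' ') : xs = ys := by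
  apply List.ext_getElem hlen
  intro m h1 h2
  have := h m h2
  rwa [List.getD_eq_getElem _ _ h1, List.getD_eq_getElem _ _ h2] at this

-- A's inner loop is an existence scan over the candidate swap positions
lemma pvASwapLoop_eq_any (xs ys : List Char) (l : List Nat) :
    pvASwapLoop xs ys l
      = l.any (fun j => decide ((xs.set j (xs.getD (j + 1) ' ')).set (j + 1) (xs.getD j ' ') = ys)) := by
  induction l with
  | nil => rfl
  | cons j rest ih =>
    simp only [pvASwapLoop, List.any_cons]
    by_cases h : (xs.set j (xs.getD (j + 1) ' ')).set (j + 1) (xs.getD j ' ') = ys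
    · rw [if_pos h, decide_eq_true h, Bool.true_or]
    · rw [if_neg h, decide_eq_false h, Bool.false_or]
      exact ih

-- reading an adjacent swap through getD
lemma pv_getD_swap (xs : List Char) (j m : Nat) (_hj : j + 1 < xs.length) (hm : m < xs.length) :
    ((xs.set j (xs.getD (j + 1) ' ')).set (j + 1) (xs.getD j ' ')).getD m ' '
      = if m = j then xs.getD (j + 1) ' ' else if m = j + 1 then xs.getD j ' ' else xs.getD m ' ' := by
  have hm' : m < ((xs.set j (xs.getD (j + 1) ' ')).set (j + 1) (xs.getD j ' ')).length := by
    simpa using hm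
  rw [List.getD_eq_getElem _ _ hm']
  simp only [List.getElem_set]
  split_ifs with h1 h2 h3 h4 <;>
    first
      | rfl
      | omega
      | rw [List.getD_eq_getElem _ _ hm]

-- a filter of range k whose predicate holds exactly at j and j+1
lemma pv_filter_range_eq_pair (k j : Nat) (p : Nat → Bool) (hj : j + 1 < k)
    (hfalse : ∀ m, m < k → m ≠ j → m ≠ j + 1 → p m = false)
    (hpj : p j = true) (hpj1 : p (j + 1) = true) :
    (List.range k).filter p = [j, j + 1] := by
  have hk : k = (j + 1 + 1) + (k - (j + 2)) := by omega
  rw [hk, List.range_add, List.filter_append, List.range_succ, List.range_succ,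
    List.filter_append, List.filter_append]
  have h1 : (List.range j).filter p = [] := by
    rw [List.filter_eq_nil_iff]
    intro m hm
    simp only [List.mem_range] at hm
    simp [hfalse m (by omega) (by omega) (by omega)]
  have h2 : (List.map (fun x => j + 1 + 1 + x) (List.range (k - (j + 2)))).filter p = [] := by
    rw [List.filter_eq_nil_iff]
    intro m hm
    simp only [List.mem_map, List.mem_range] at hm
    obtain ⟨x, hx, rfl⟩ := hm
    simp [hfalse (j + 1 + 1 + x) (by omega) (by omega) (by omega)]
  simp [h1, h2, hpj, hpj1]

-- the core per-window fact: A's "equal, or some adjacent swap equal" verdict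
-- coincides with B's mismatch-list verdict, on a window xs of the key's length
lemma pv_window_eq (xs ys : List Char) (hlen : xs.length = ys.length) (acc : Int) :
    (if xs = ys then acc + 1
     else if pvASwapLoop xs ys (List.range (ys.length - 1)) then acc + 1 else acc)
    = (if (List.range ys.length).filter (fun j => xs.getD j ' ' != ys.getD j ' ') = [] then acc + 1
       else if ((List.range ys.length).filter (fun j => xs.getD j ' ' != ys.getD j ' ')).length = 2
            ∧ ((List.range ys.length).filter (fun j => xs.getD j ' ' != ys.getD j ' ')).getD 1 0
              = ((List.range ys.length).filter (fun j => xs.getD j ' ' != ys.getD j ' ')).getD 0 0 + 1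
            ∧ xs.getD (((List.range ys.length).filter (fun j => xs.getD j ' ' != ys.getD j ' ')).getD 0 0) ' '
              = ys.getD (((List.range ys.length).filter (fun j => xs.getD j ' ' != ys.getD j ' ')).getD 1 0) ' '
            ∧ xs.getD (((List.range ys.length).filter (fun j => xs.getD j ' ' != ys.getD j ' ')).getD 1 0) ' '
              = ys.getD (((List.range ys.length).filter (fun j => xs.getD j ' ' != ys.getD j ' ')).getD 0 0) ' '
       then acc + 1 else acc) := by
  set k := ys.length with hk
  set mm := (List.range k).filter (fun j => xs.getD j ' ' != ys.getD j ' ') with hmm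
  have hmem : ∀ m, m ∈ mm ↔ m < k ∧ xs.getD m ' ' ≠ ys.getD m ' ' := by
    intro m
    simp [hmm, List.mem_filter]
  have hnil : mm = [] ↔ xs = ys := by
    constructor
    · intro h
      apply pv_ext_getD hlen
      intro m hmk
      by_contra hne
      have : m ∈ mm := (hmem m).mpr ⟨hmk, hne⟩
      simp [h] at this
    · intro h
      subst h
      simp [hmm]
  by_cases heq : xs = ys
  · rw [if_pos heq, if_pos (hnil.mpr heq)]
  · rw [if_neg heq, if_neg (fun h => heq (hnil.mp h))]
    have hiff : (pvASwapLoop xs ys (List.range (k - 1)) = true)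
        ↔ (mm.length = 2 ∧ mm.getD 1 0 = mm.getD 0 0 + 1
            ∧ xs.getD (mm.getD 0 0) ' ' = ys.getD (mm.getD 1 0) ' '
            ∧ xs.getD (mm.getD 1 0) ' ' = ys.getD (mm.getD 0 0) ' ') := by
      rw [pvASwapLoop_eq_any, List.any_eq_true]
      constructor
      · rintro ⟨j, hjmem, hswap⟩
        simp only [List.mem_range] at hjmem
        rw [decide_eq_true_iff] at hswap
        have hjk : j + 1 < k := by omega
        have hjx : j + 1 < xs.length := by omega
        have hys : ∀ m, m < k →
            ys.getD m ' ' = if m = j then xs.getD (j + 1) ' '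
              else if m = j + 1 then xs.getD j ' ' else xs.getD m ' ' := by
          intro m hmk
          rw [← hswap, pv_getD_swap xs j m hjx (by omega)]
        have hyj : ys.getD j ' ' = xs.getD (j + 1) ' ' := by
          rw [hys j (by omega)]; simp
        have hyj1 : ys.getD (j + 1) ' ' = xs.getD j ' ' := by
          rw [hys (j + 1) (by omega)]; simp
        have hpj : xs.getD j ' ' ≠ ys.getD j ' ' := by
          intro h
          apply heq
          apply pv_ext_getD hlen
          intro m hmk
          rcases eq_or_ne m j with rfl | hmj
          · exact h
          rcases eq_or_ne m (j + 1) with rfl | hmj1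
          · rw [hyj1, h, hyj]
          · rw [hys m hmk, if_neg hmj, if_neg hmj1]
        have hpj1 : xs.getD (j + 1) ' ' ≠ ys.getD (j + 1) ' ' := by
          intro h
          exact hpj (by rw [hyj, h, hyj1])
        have hpair : mm = [j, j + 1] := by
          rw [hmm]
          apply pv_filter_range_eq_pair k j _ hjk
          · intro m hmk hmj hmj1
            simp only [bne_eq_false_iff_eq]
            rw [hys m hmk, if_neg hmj, if_neg hmj1]
          · simpa using hpj
          · simpa using hpj1
        refine ⟨by simp [hpair], by simp [hpair], ?_, ?_⟩
        · simp only [hpair, List.getD_cons_zero, List.getD_cons_succ]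
          exact hyj1.symm
        · simp only [hpair, List.getD_cons_zero, List.getD_cons_succ]
          exact hyj.symm
      · rintro ⟨hlen2, hadj, hc1, hc2⟩
        obtain ⟨p, q, hmmv⟩ := List.length_eq_two.mp hlen2
        rw [hmmv] at hadj hc1 hc2
        simp only [List.getD_cons_zero, List.getD_cons_succ] at hadj hc1 hc2
        have hpmem := (hmem p).mp (by rw [hmmv]; simp)
        have hqmem := (hmem q).mp (by rw [hmmv]; simp)
        subst hadj
        refine ⟨p, by simp only [List.mem_range]; omega, ?_⟩
        rw [decide_eq_true_iff]
        have hpx : p + 1 < xs.length := by omega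
        apply pv_ext_getD (by simpa using hlen)
        intro m hmk
        rw [pv_getD_swap xs p m hpx (by omega)]
        rcases eq_or_ne m p with rfl | hmp
        · rw [if_pos rfl]
          exact hc2
        rcases eq_or_ne m (p + 1) with rfl | hmp1
        · rw [if_neg hmp, if_pos rfl]
          exact hc1
        · rw [if_neg hmp, if_neg hmp1]
          by_contra hne
          have hmmem : m ∈ mm := (hmem m).mpr ⟨hmk, hne⟩
          rw [hmmv] at hmmem
          simp only [List.mem_cons, List.not_mem_nil, or_false] at hmmem
          rcases hmmem with h | h
          · exact hmp h
          · exact hmp1 h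
    exact if_congr hiff rfl rfl

-- reading B's window through the substring xs = text[i:i+k]
lemma pv_bwindow_eq (keyL textL : List Char) (i : Nat) (count : Int) (xs : List Char)
    (hxs : xs = (textL.drop i).take keyL.length)
    (ht : i + keyL.length ≤ textL.length) :
    pvBWindow keyL textL i count
    = (if (List.range keyL.length).filter (fun j => xs.getD j ' ' != keyL.getD j ' ') = [] then count + 1
       else if ((List.range keyL.length).filter (fun j => xs.getD j ' ' != keyL.getD j ' ')).length = 2
            ∧ ((List.range keyL.length).filter (fun j => xs.getD j ' ' != keyL.getD j ' ')).getD 1 0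
              = ((List.range keyL.length).filter (fun j => xs.getD j ' ' != keyL.getD j ' ')).getD 0 0 + 1
            ∧ xs.getD (((List.range keyL.length).filter (fun j => xs.getD j ' ' != keyL.getD j ' ')).getD 0 0) ' '
              = keyL.getD (((List.range keyL.length).filter (fun j => xs.getD j ' ' != keyL.getD j ' ')).getD 1 0) ' '
            ∧ xs.getD (((List.range keyL.length).filter (fun j => xs.getD j ' ' != keyL.getD j ' ')).getD 1 0) ' '
              = keyL.getD (((List.range keyL.length).filter (fun j => xs.getD j ' ' != keyL.getD j ' ')).getD 0 0) ' '
       then count + 1 else count) := by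
  have hget : ∀ j, j < keyL.length → textL.getD (i + j) ' ' = xs.getD j ' ' := by
    intro j hj
    have h1 : i + j < textL.length := by omega
    have h2 : j < xs.length := by
      rw [hxs]
      simp only [List.length_take, List.length_drop]
      omega
    rw [List.getD_eq_getElem _ _ h1, List.getD_eq_getElem _ _ h2]
    subst hxs
    rw [List.getElem_take, List.getElem_drop]
  have hfe : (List.range keyL.length).filter (fun j => textL.getD (i + j) ' ' != keyL.getD j ' ')
      = (List.range keyL.length).filter (fun j => xs.getD j ' ' != keyL.getD j ' ') := by
    apply List.filter_congr
    intro j hj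
    rw [hget j (List.mem_range.mp hj)]
  simp only [pvBWindow, hfe]
  set mm := (List.range keyL.length).filter (fun j => xs.getD j ' ' != keyL.getD j ' ') with hmm
  have hmemk : ∀ m, m ∈ mm → m < keyL.length := by
    intro m hm
    rw [hmm] at hm
    have := List.mem_of_mem_filter hm
    simpa using this
  rcases hm : mm with _ | ⟨p, _ | ⟨q, rest⟩⟩
  · simp
  · simp
  · have hp : p < keyL.length := hmemk p (by rw [hm]; simp)
    have hq : q < keyL.length := hmemk q (by rw [hm]; simp)
    rcases rest with _ | ⟨r, rest'⟩
    · simp only [List.getD_cons_zero, List.getD_cons_succ]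
      rw [hget p hp, hget q hq]
    · simp only [List.length_cons]
      have h2 : ¬(rest'.length + 1 + 1 + 1 = 2) := by omega
      rw [if_neg (by simp : ¬(p :: q :: r :: rest' = [])), if_neg (fun hc => h2 hc.1),
        if_neg (by simp : ¬(p :: q :: r :: rest' = [])), if_neg (fun hc => h2 hc.1)]

-- ===== VERDICT (by name: the statement is the Claim_ definition above) =====
theorem similar_text_substr_count_spec : Claim_equal_similar_text_substr_count := by
  intro key text _hdom
  unfold Spec_similar_text_substr_count
  unfold similar_text_substr_count similar_text_substr_count_alt
  simp only []
  set keyL := key.toList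
  set textL := text.toList
  set k := keyL.length with hk
  set t := textL.length with ht
  by_cases hdeg : k = 0 ∨ t < k
  · rw [if_pos hdeg, if_pos hdeg]
  · rw [if_neg hdeg, if_neg hdeg]
    simp only [not_or, not_lt] at hdeg
    apply PySem.List.foldl_congr_mem
    intro acc i hi
    have hik : i + k ≤ t := by
      have := List.mem_range.mp hi
      omega
    have hslice : PySem.List.slice textL (some (i : Int)) (some ((i : Int) + (k : Int)))
        = (textL.drop i).take k := PySem.List.slice_natCast_add textL i k
    have hlen : ((textL.drop i).take k).length = k := by
      simp only [List.length_take, List.length_drop]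
      omega
    rw [hslice, pv_bwindow_eq keyL textL i acc ((textL.drop i).take k) rfl hik]
    have := pv_window_eq ((textL.drop i).take k) keyL hlen acc
    rw [← hk] at this
    exact this
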